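-- pv_equiv track=rewrite | github.com/diofant/diofant | diofant/logic/boolalg.py | _rem_redundancy
-- ===== SOURCE A (Python) =====
-- def _compare_term(minterm, term):
--     """
--     Return True if a binary term is satisfied by the given term. Used
--     for recognizing prime implicants.
--
--     """
--     for i, x in enumerate(term):
--         if x != 3 and x != minterm[i]:
--             return False
--     return True
--
-- def _rem_redundancy(l1, terms):
--     """
--     After the truth table has been sufficiently simplified, use the prime
--     implicant table method to recognize and eliminate redundant pairs,
--     and return the essential arguments.
--
--     """
--     essential = []
--     for x in terms:
--         temporary = []
--         for y in l1:
--             if _compare_term(x, y):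
--                 temporary.append(y)
--         if len(temporary) == 1:
--             if temporary[0] not in essential:
--                 essential.append(temporary[0])
--     for x in terms:
--         for y in essential:
--             if _compare_term(x, y):
--                 break
--         else:
--             for z in l1:  # pragma: no branch
--                 if _compare_term(x, z):
--                     assert z not in essential
--                     essential.append(z)
--                     break
--
--     return essential
-- ===== SOURCE B (Python) =====
-- def _compare_term(minterm, term):
--     return all(x == 3 or x == m for m, x in zip(minterm, term))
--
--
-- def _rem_redundancy(l1, terms):
--     # Transposed prime-implicant chart: for each implicant, the term indices it covers.
--     cover = [[i for i, x in enumerate(terms) if _compare_term(x, y)] for y in l1]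
--     # Per-term tallies: how many implicants cover it, and the first one that does.
--     count = [0] * len(terms)
--     first = [-1] * len(terms)
--     for j, c in enumerate(cover):
--         for i in c:
--             count[i] += 1
--             if first[i] < 0:
--                 first[i] = j
--     essential = []
--     covered = [False] * len(terms)
--
--     def select(j):
--         essential.append(l1[j])
--         for k in cover[j]:
--             covered[k] = True
--
--     for i in range(len(terms)):
--         if count[i] == 1 and l1[first[i]] not in essential:
--             select(first[i])
--     for i in range(len(terms)):
--         if not covered[i] and first[i] >= 0:
--             select(first[i])
--     return essential
-- ===== Notes on version B (the rewrite author's own statement) =====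
-- stated objective: alternative
-- what changed: B transposes the chart (term indices covered per implicant), tallies per-term cover count and first covering implicant into arrays, and maintains an incremental covered bitmap updated when an implicant is selected, instead of A's repeated _compare_term scans of l1 and of the growing essential list.
import Mathlib
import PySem

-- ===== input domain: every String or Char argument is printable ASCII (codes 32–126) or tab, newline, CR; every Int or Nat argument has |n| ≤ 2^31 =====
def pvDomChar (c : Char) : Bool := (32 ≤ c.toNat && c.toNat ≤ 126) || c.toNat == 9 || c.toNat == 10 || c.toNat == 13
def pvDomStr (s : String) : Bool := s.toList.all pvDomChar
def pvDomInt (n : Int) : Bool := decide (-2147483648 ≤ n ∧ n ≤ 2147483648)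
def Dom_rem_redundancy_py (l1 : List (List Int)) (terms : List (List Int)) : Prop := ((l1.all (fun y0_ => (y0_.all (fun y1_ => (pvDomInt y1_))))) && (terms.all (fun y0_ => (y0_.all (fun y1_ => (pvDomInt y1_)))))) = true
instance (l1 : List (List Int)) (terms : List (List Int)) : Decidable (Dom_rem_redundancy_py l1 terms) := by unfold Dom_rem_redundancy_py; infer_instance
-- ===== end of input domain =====

-- B transposes the prime-implicant chart (term indices per implicant), tallies per-term
-- cover count and first covering implicant into arrays, and keeps an incremental covered
-- bitmap updated on selection, instead of A's repeated _compare_term scans of l1 and of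
-- the growing essential list (alternative decomposition; same asymptotic cost).

-- ===== PORT A =====
-- _compare_term: loop over enumerate(term); minterm[i] out of range raises IndexError in
-- Python — those inputs are excluded by Pre_, here getD supplies a default (never reached
-- inside Pre_).
def compareTermGo (minterm : List Int) : List Int → Nat → Bool
  | [], _ => true
  | t :: rest, i =>
      if t ≠ 3 ∧ t ≠ minterm.getD i 0 then false else compareTermGo minterm rest (i + 1)

def compareTerm (minterm term : List Int) : Bool := compareTermGo minterm term 0

def rem_redundancy_py (l1 : List (List Int)) (terms : List (List Int)) : List (List Int) :=
  -- first loop: collect implicants matching exactly one term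
  let essential := terms.foldl (fun essential x =>
    let temporary := l1.foldl (fun temporary y =>
      if compareTerm x y then temporary ++ [y] else temporary) []
    match temporary with                          -- len(temporary) == 1, temporary[0]
    | [t] => if essential.contains t then essential else essential ++ [t]
    | _ => essential) []
  -- second loop: for uncovered terms, rescan l1 for the first matching implicant
  terms.foldl (fun essential x =>
    if essential.any (fun y => compareTerm x y) then essential   -- for…break / else
    else
      match l1.find? (fun z => compareTerm x z) with             -- for z in l1 … break
      | some z => essential ++ [z]
      | none => essential) essential

-- ===== PORT B =====
-- Source B's zip-based matcher
def compareTermB (minterm term : List Int) : Bool :=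
  (minterm.zip term).all (fun p => p.2 == 3 || p.2 == p.1)

-- [i for i, x in enumerate(terms) if _compare_term(x, y)]
def rowOfB (terms : List (List Int)) (y : List Int) : List Nat :=
  ((terms.zipIdx).filter (fun p => compareTermB p.1 y)).map (fun p => p.2)

-- inner tally loop: for i in c: count[i] += 1; if first[i] < 0: first[i] = j
def tallyRow (j : Nat) (r : List Nat) (cf : List Int × List Int) : List Int × List Int :=
  r.foldl (fun cf i =>
    (cf.1.set i (cf.1.getD i 0 + 1),
     if cf.2.getD i 0 < 0 then cf.2.set i (j : Int) else cf.2)) cf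

-- for k in cover[j]: covered[k] = True
def selectGo (covered : List Bool) (r : List Nat) : List Bool :=
  r.foldl (fun cov k => cov.set k true) covered

-- def select(j): essential.append(l1[j]); mark cover[j] covered
def selectB (l1 : List (List Int)) (cover : List (List Nat))
    (st : List (List Int) × List Bool) (j : Int) : List (List Int) × List Bool :=
  (st.1 ++ [PySem.List.pyGetD l1 j []], selectGo st.2 (PySem.List.pyGetD cover j []))

-- phase-1 loop body: if count[i] == 1 and l1[first[i]] not in essential: select(first[i])
def bodyB1 (l1 : List (List Int)) (cover : List (List Nat)) (count first : List Int)
    (st : List (List Int) × List Bool) (i : Nat) : List (List Int) × List Bool :=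
  if count.getD i 0 = 1 ∧ ¬ st.1.contains (PySem.List.pyGetD l1 (first.getD i 0) [])
  then selectB l1 cover st (first.getD i 0) else st

-- phase-2 loop body: if not covered[i] and first[i] >= 0: select(first[i])
def bodyB2 (l1 : List (List Int)) (cover : List (List Nat)) (first : List Int)
    (st : List (List Int) × List Bool) (i : Nat) : List (List Int) × List Bool :=
  if st.2.getD i false = false ∧ 0 ≤ first.getD i 0
  then selectB l1 cover st (first.getD i 0) else st

def rem_redundancy_py_alt (l1 : List (List Int)) (terms : List (List Int)) : List (List Int) :=
  let cover := l1.map (rowOfB terms)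
  let cf := (cover.zipIdx).foldl (fun cf cj => tallyRow cj.2 cj.1 cf)
    (List.replicate terms.length 0, List.replicate terms.length (-1 : Int))
  let st1 := (List.range terms.length).foldl (bodyB1 l1 cover cf.1 cf.2)
    ([], List.replicate terms.length false)
  let st2 := (List.range terms.length).foldl (bodyB2 l1 cover cf.2) st1
  st2.1

-- ===== PRECONDITION & SPEC =====
-- compareRaisesB x y: _compare_term(x, y) raises IndexError — y matches x on the zipped
-- prefix and has a non-3 entry beyond the end of x.
def compareRaisesB (x y : List Int) : Bool :=
  (x.zip y).all (fun p => p.2 == 3 || p.2 == p.1) && !((y.drop x.length).all (fun t => t == 3))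

-- Pre_ excludes exactly the inputs on which A raises IndexError inside _compare_term,
-- i.e. some implicant y in l1 reads past the end of some term x.
def Pre_rem_redundancy_py (l1 : List (List Int)) (terms : List (List Int)) : Prop :=
  ∀ x ∈ terms, ∀ y ∈ l1, compareRaisesB x y = false
instance (l1 : List (List Int)) (terms : List (List Int)) : Decidable (Pre_rem_redundancy_py l1 terms) := by unfold Pre_rem_redundancy_py; infer_instance

def pvWitness_rem_redundancy_py : List (List Int) × List (List Int) :=
  ([[1, 0], [3, 0], [1, 3]], [[1, 0], [0, 0], [1, 1]])

def Spec_rem_redundancy_py (l1 : List (List Int)) (terms : List (List Int)) (out : List (List Int)) : Prop := out = rem_redundancy_py_alt l1 terms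
instance (l1 : List (List Int)) (terms : List (List Int)) (out : List (List Int)) : Decidable (Spec_rem_redundancy_py l1 terms out) := by unfold Spec_rem_redundancy_py; infer_instance

-- ===== CLAIM (what is proved, stated in full; the proofs are below) =====
def Claim_equal_rem_redundancy_py : Prop := ∀ (l1 : List (List Int)) (terms : List (List Int)), Dom_rem_redundancy_py l1 terms → Pre_rem_redundancy_py l1 terms → Spec_rem_redundancy_py l1 terms (rem_redundancy_py l1 terms)

-- ===== LEMMAS AND PROOFS =====

theorem headI_mem_of_ne_nil (l : List (List Int)) (h : l ≠ []) : l.headI ∈ l := by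
  cases l with
  | nil => exact absurd rfl h
  | cons a t => exact List.mem_cons_self ..

-- ---- A's result as a fold over the chart columns (chart(x) = filter of l1) ----
def stepA1 (l1 essential : List (List Int)) (x : List Int) : List (List Int) :=
  let temporary := l1.foldl (fun temporary y =>
    if compareTerm x y then temporary ++ [y] else temporary) []
  match temporary with
  | [t] => if essential.contains t then essential else essential ++ [t]
  | _ => essential

def stepA2 (l1 essential : List (List Int)) (x : List Int) : List (List Int) :=
  if essential.any (fun y => compareTerm x y) then essential
  else
    match l1.find? (fun z => compareTerm x z) with
    | some z => essential ++ [z]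
    | none => essential

def stepB1 (essential m : List (List Int)) : List (List Int) :=
  if m.length = 1 ∧ ¬ essential.contains m.headI then essential ++ [m.headI]
  else essential

def stepB2 (essential m : List (List Int)) : List (List Int) :=
  if m ≠ [] ∧ ¬ (m.any fun y => essential.contains y) then essential ++ [m.headI]
  else essential

theorem foldl_filter_aux (x : List Int) (l : List (List Int)) (acc : List (List Int)) :
    l.foldl (fun temporary y => if compareTerm x y then temporary ++ [y] else temporary) acc
      = acc ++ l.filter (fun y => compareTerm x y) := by
  induction l generalizing acc with
  | nil => simp
  | cons y l ih =>
      simp only [List.foldl_cons, List.filter_cons]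
      by_cases h : compareTerm x y = true
      · simp [h, ih]
      · simp [h, ih]

theorem find?_eq_head?_filter (p : List Int → Bool) (l : List (List Int)) :
    l.find? p = (l.filter p).head? := by
  induction l with
  | nil => rfl
  | cons y l ih =>
      by_cases h : p y = true
      · rw [List.find?_cons_of_pos h, List.filter_cons_of_pos h, List.head?_cons]
      · rw [List.find?_cons_of_neg h, List.filter_cons_of_neg h, ih]

theorem stepA1_eq (l1 ess : List (List Int)) (x : List Int) :
    stepA1 l1 ess x = stepB1 ess (l1.filter (fun y => compareTerm x y)) := by
  unfold stepA1
  rw [foldl_filter_aux, List.nil_append]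
  cases hm : l1.filter (fun y => compareTerm x y) with
  | nil => simp [stepB1]
  | cons t rest =>
      cases rest with
      | nil => by_cases hc : t ∈ ess <;> simp [stepB1, hc]
      | cons u v => simp [stepB1]

theorem phase1_eq (l1 terms ess : List (List Int)) :
    terms.foldl (stepA1 l1) ess
      = (terms.map (fun x => l1.filter (fun y => compareTerm x y))).foldl stepB1 ess := by
  induction terms generalizing ess with
  | nil => rfl
  | cons x terms ih =>
      rw [List.foldl_cons, List.map_cons, List.foldl_cons, stepA1_eq]
      exact ih _

-- scanning ess with a predicate equals scanning the filter column for membership in ess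
theorem any_cond_eq (p : List Int → Bool) (l1 ess : List (List Int))
    (hess : ∀ e ∈ ess, e ∈ l1) :
    (ess.any p) = ((l1.filter p).any fun y => ess.contains y) := by
  rcases h : ess.any p with _ | _
  · rcases h2 : (l1.filter p).any fun y => ess.contains y with _ | _
    · rfl
    · exfalso
      rw [List.any_eq_true] at h2
      rcases h2 with ⟨y, hy, hc⟩
      rw [List.mem_filter] at hy
      rw [List.any_eq_false] at h
      exact h y (by simpa using hc) hy.2
  · rw [List.any_eq_true] at h
    rcases h with ⟨y, hy, hc⟩
    rw [Eq.comm, List.any_eq_true]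
    exact ⟨y, List.mem_filter.mpr ⟨hess y hy, hc⟩, by simpa using hy⟩

theorem stepA2_eq (l1 ess : List (List Int)) (x : List Int)
    (hess : ∀ e ∈ ess, e ∈ l1) :
    stepA2 l1 ess x = stepB2 ess (l1.filter (fun y => compareTerm x y)) := by
  unfold stepA2
  rw [any_cond_eq (fun y => compareTerm x y) l1 ess hess, find?_eq_head?_filter]
  cases hm : l1.filter (fun y => compareTerm x y) with
  | nil => simp [stepB2]
  | cons z rest =>
      simp [stepB2]
      split_ifs with h1 h2 <;> first | rfl | tauto |
        (rename_i hq
         exact absurd ⟨fun h => h1 (Or.inl h), fun w hw hmem => h1 (Or.inr ⟨w, hw, hmem⟩)⟩ hq)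

theorem stepB2_mem (l1 ess m : List (List Int))
    (hess : ∀ e ∈ ess, e ∈ l1) (hm : ∀ y ∈ m, y ∈ l1) :
    ∀ e ∈ stepB2 ess m, e ∈ l1 := by
  intro e he
  simp only [stepB2] at he
  split at he
  · rename_i hcond
    rcases List.mem_append.mp he with h | h
    · exact hess e h
    · rw [List.mem_singleton] at h; subst h
      exact hm _ (headI_mem_of_ne_nil _ hcond.1)
  · exact hess e he

theorem phase2_eq (l1 terms ess : List (List Int)) (hess : ∀ e ∈ ess, e ∈ l1) :
    terms.foldl (stepA2 l1) ess
      = (terms.map (fun x => l1.filter (fun y => compareTerm x y))).foldl stepB2 ess := by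
  induction terms generalizing ess with
  | nil => rfl
  | cons x terms ih =>
      rw [List.foldl_cons, List.map_cons, List.foldl_cons, stepA2_eq l1 ess x hess]
      exact ih _ (stepB2_mem l1 ess _ hess (fun y hy => (List.mem_filter.mp hy).1))

theorem phase1_mem (l1 : List (List Int)) (ms : List (List (List Int))) (ess : List (List Int))
    (hess : ∀ e ∈ ess, e ∈ l1) (hms : ∀ m ∈ ms, ∀ y ∈ m, y ∈ l1) :
    ∀ e ∈ ms.foldl stepB1 ess, e ∈ l1 := by
  induction ms generalizing ess with
  | nil => simpa using hess
  | cons m ms ih =>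
      rw [List.foldl_cons]
      refine ih _ ?_ (fun m' hm' => hms m' (List.mem_cons_of_mem _ hm'))
      have hm : ∀ y ∈ m, y ∈ l1 := hms m (List.mem_cons_self ..)
      intro e he
      simp only [stepB1] at he
      split at he
      · rename_i hcond
        rcases List.mem_append.mp he with h | h
        · exact hess e h
        · rw [List.mem_singleton] at h; subst h
          exact hm _ (headI_mem_of_ne_nil _ (by intro h0; simp [h0] at hcond))
      · exact hess e he

-- ---- the two matchers agree on raise-free pairs ----
def cmpAux : List Int → List Int → Bool
  | _, [] => true
  | m, t :: ts => if t ≠ 3 ∧ t ≠ m.headD 0 then false else cmpAux m.tail ts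

theorem compareTermGo_eq_cmpAux (m : List Int) (t : List Int) :
    ∀ i, compareTermGo m t i = cmpAux (m.drop i) t := by
  induction t with
  | nil => intro i; rfl
  | cons a ts ih =>
      intro i
      have h1 : m.getD i 0 = (m.drop i).headD 0 := by
        simp [List.getD_eq_getElem?_getD, List.headD_eq_head?_getD, List.head?_drop]
      simp only [compareTermGo, cmpAux, h1, List.tail_drop, ih (i + 1)]

theorem cmpAux_eq_compareTermB (t : List Int) :
    ∀ m, compareRaisesB m t = false → cmpAux m t = compareTermB m t := by
  induction t with
  | nil => intro m _; cases m <;> rfl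
  | cons a ts ih =>
      intro m h
      cases m with
      | nil =>
          simp only [compareRaisesB, List.zip_nil_left, List.all_nil, Bool.true_and,
            List.length_nil, List.drop_zero, Bool.not_eq_false', List.all_eq_true] at h
          have ha : a = 3 := by simpa using h a (List.mem_cons_self ..)
          have hts : compareRaisesB ([] : List Int) ts = false := by
            simp only [compareRaisesB, List.zip_nil_left, List.all_nil, Bool.true_and,
              List.length_nil, List.drop_zero, Bool.not_eq_false', List.all_eq_true]
            exact fun x hx => h x (List.mem_cons_of_mem _ hx)
          simp only [cmpAux, compareTermB, List.zip_nil_left, List.all_nil]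
          rw [if_neg (by simp [ha])]
          have := ih [] hts
          simp only [compareTermB, List.zip_nil_left, List.all_nil] at this
          simpa using this
      | cons b ms =>
          by_cases hp : (a == 3 || a == b) = true
          · have hcond : ¬ (a ≠ 3 ∧ a ≠ (b :: ms).headD 0) := by
              simp only [List.headD_cons]
              rcases Bool.or_eq_true .. |>.mp hp with h3 | hb
              · exact fun hc => hc.1 (by simpa using h3)
              · exact fun hc => hc.2 (by simpa using hb)
            have hts : compareRaisesB ms ts = false := by
              simp only [compareRaisesB, List.zip_cons_cons, List.all_cons, hp,
                Bool.true_and, List.length_cons, List.drop_succ_cons] at h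
              simpa [compareRaisesB] using h
            simp only [cmpAux, if_neg hcond, List.tail_cons, ih ms hts,
              compareTermB, List.zip_cons_cons, List.all_cons, hp, Bool.true_and]
          · have hcond : a ≠ 3 ∧ a ≠ (b :: ms).headD 0 := by
              simp only [Bool.or_eq_true, beq_iff_eq, not_or] at hp
              exact ⟨hp.1, by simpa using hp.2⟩
            simp only [cmpAux, if_pos hcond, compareTermB, List.zip_cons_cons,
              List.all_cons, hp, Bool.false_and]

theorem compareTerm_eq_B (x y : List Int) (h : compareRaisesB x y = false) :
    compareTerm x y = compareTermB x y := by
  rw [compareTerm, compareTermGo_eq_cmpAux x y 0, List.drop_zero, cmpAux_eq_compareTermB y x h]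

-- ---- B's cover rows as filters of an index range ----
theorem rowOfB_aux (y : List Int) :
    ∀ (ts : List (List Int)) (s : Nat),
      ((ts.zipIdx s).filter (fun p => compareTermB p.1 y)).map (fun p => p.2)
        = (List.range' s ts.length).filter (fun k => compareTermB (ts.getD (k - s) []) y) := by
  intro ts
  induction ts with
  | nil => intro s; rfl
  | cons a rest ih =>
      intro s
      have hcg : ∀ k ∈ List.range' (s + 1) rest.length,
          (compareTermB ((a :: rest).getD (k - s) []) y)
            = (compareTermB (rest.getD (k - (s + 1)) []) y) := by
        intro k hk
        have hs : s + 1 ≤ k := (List.mem_range'_1.mp hk).1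
        have : k - s = (k - (s + 1)) + 1 := by omega
        rw [this, List.getD_cons_succ]
      rw [List.zipIdx_cons, List.length_cons, List.range'_succ]
      by_cases hp : compareTermB a y = true
      · rw [List.filter_cons_of_pos (by simpa using hp), List.map_cons,
          List.filter_cons_of_pos (by simpa using hp), ih (s + 1), List.filter_congr hcg]
      · rw [List.filter_cons_of_neg (by simpa using hp),
          List.filter_cons_of_neg (by simpa [Nat.sub_self] using hp), ih (s + 1),
          List.filter_congr hcg]

theorem rowOfB_eq (terms : List (List Int)) (y : List Int) :
    rowOfB terms y
      = (List.range terms.length).filter (fun k => compareTermB (terms.getD k []) y) := by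
  rw [rowOfB, rowOfB_aux y terms 0, List.range_eq_range']
  exact List.filter_congr (fun k _ => by rw [Nat.sub_zero])

theorem mem_rowOfB (terms : List (List Int)) (y : List Int) (k : Nat) :
    k ∈ rowOfB terms y ↔ k < terms.length ∧ compareTermB (terms.getD k []) y = true := by
  rw [rowOfB_eq]
  simp only [List.mem_filter, List.mem_range]

theorem nodup_rowOfB (terms : List (List Int)) (y : List Int) : (rowOfB terms y).Nodup := by
  rw [rowOfB_eq]; exact List.Nodup.filter _ List.nodup_range

-- ---- tally loop specs ----
theorem tallyRow_spec (j : Nat) :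
    ∀ (r : List Nat) (c f : List Int), r.Nodup → (∀ k ∈ r, k < c.length ∧ k < f.length) →
      (tallyRow j r (c, f)).1.length = c.length ∧ (tallyRow j r (c, f)).2.length = f.length ∧
      ∀ i, (tallyRow j r (c, f)).1.getD i 0 = c.getD i 0 + (if i ∈ r then 1 else 0) ∧
           (tallyRow j r (c, f)).2.getD i 0
             = (if i ∈ r ∧ f.getD i 0 < 0 then (j : Int) else f.getD i 0) := by
  intro r
  induction r with
  | nil => intro c f _ _; exact ⟨rfl, rfl, fun i => by simp [tallyRow]⟩
  | cons k r ih =>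
      intro c f hnd hlt
      have hk := hlt k (List.mem_cons_self ..)
      have hknr : k ∉ r := (List.nodup_cons.mp hnd).1
      have hstep : tallyRow j (k :: r) (c, f)
          = tallyRow j r (c.set k (c.getD k 0 + 1),
              if f.getD k 0 < 0 then f.set k (j : Int) else f) := by
        simp [tallyRow]
      set c' := c.set k (c.getD k 0 + 1) with hc'
      set f' := (if f.getD k 0 < 0 then f.set k (j : Int) else f) with hf'
      have hlen' : c'.length = c.length ∧ f'.length = f.length := by
        constructor
        · simp [hc']
        · rw [hf']; split <;> simp
      obtain ⟨ih1, ih2, ih3⟩ := ih c' f' (List.nodup_cons.mp hnd).2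
        (fun k' hk' => by
          have := hlt k' (List.mem_cons_of_mem _ hk')
          omega)
      refine ⟨by rw [hstep, ih1, hlen'.1], by rw [hstep, ih2, hlen'.2], fun i => ?_⟩
      obtain ⟨ihc, ihf⟩ := ih3 i
      rw [hstep]
      constructor
      · rw [ihc]
        by_cases hik : i = k
        · subst hik
          have h1 : c'.getD i 0 = c.getD i 0 + 1 := by
            rw [hc', List.getD_eq_getElem?_getD, List.getElem?_set_self hk.1,
              Option.getD_some]
          rw [h1, if_neg hknr, if_pos (List.mem_cons_self ..)]
          ring
        · have h1 : c'.getD i 0 = c.getD i 0 := by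
            rw [hc', List.getD_eq_getElem?_getD, List.getElem?_set_ne (Ne.symm hik),
              ← List.getD_eq_getElem?_getD]
          have hmem : (i ∈ k :: r) ↔ i ∈ r := by simp [List.mem_cons, hik]
          rw [h1]
          by_cases hir : i ∈ r
          · rw [if_pos hir, if_pos (hmem.mpr hir)]
          · rw [if_neg hir, if_neg (fun hh => hir (hmem.mp hh))]
      · rw [ihf]
        by_cases hik : i = k
        · subst hik
          by_cases hneg : f.getD i 0 < 0
          · have h1 : f'.getD i 0 = (j : Int) := by
              rw [hf', if_pos hneg, List.getD_eq_getElem?_getD,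
                List.getElem?_set_self hk.2, Option.getD_some]
            rw [h1, if_neg (fun hh => hknr hh.1),
              if_pos ⟨List.mem_cons_self .., hneg⟩]
          · have h1 : f'.getD i 0 = f.getD i 0 := by rw [hf', if_neg hneg]
            rw [h1, if_neg (fun hh => hneg hh.2), if_neg (fun hh => hneg hh.2)]
        · have h1 : f'.getD i 0 = f.getD i 0 := by
            rw [hf']
            split
            · rw [List.getD_eq_getElem?_getD, List.getElem?_set_ne (Ne.symm hik),
                ← List.getD_eq_getElem?_getD]
            · rfl
          have hmem : (i ∈ k :: r) ↔ i ∈ r := by simp [List.mem_cons, hik]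
          rw [h1]
          by_cases hc2 : i ∈ r ∧ f.getD i 0 < 0
          · rw [if_pos hc2, if_pos ⟨hmem.mpr hc2.1, hc2.2⟩]
          · rw [if_neg hc2, if_neg (fun hh => hc2 ⟨hmem.mp hh.1, hh.2⟩)]

theorem tally_spec (i : Nat) :
    ∀ (rows : List (List Nat)) (j0 : Nat) (c f : List Int),
      (∀ r ∈ rows, r.Nodup ∧ ∀ k ∈ r, k < c.length ∧ k < f.length) →
      ((rows.zipIdx j0).foldl (fun cf cj => tallyRow cj.2 cj.1 cf) (c, f)).1.length = c.length ∧
      ((rows.zipIdx j0).foldl (fun cf cj => tallyRow cj.2 cj.1 cf) (c, f)).2.length = f.length ∧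
      ((rows.zipIdx j0).foldl (fun cf cj => tallyRow cj.2 cj.1 cf) (c, f)).1.getD i 0
        = c.getD i 0 + (rows.countP (fun r => decide (i ∈ r)) : Int) ∧
      ((rows.zipIdx j0).foldl (fun cf cj => tallyRow cj.2 cj.1 cf) (c, f)).2.getD i 0
        = (if f.getD i 0 < 0 then
            (match rows.findIdx? (fun r => decide (i ∈ r)) with
             | some d => ((j0 + d : Nat) : Int)
             | none => f.getD i 0)
          else f.getD i 0) := by
  intro rows
  induction rows with
  | nil =>
      intro j0 c f _
      refine ⟨rfl, rfl, by simp, ?_⟩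
      rw [List.findIdx?_nil]
      simp
  | cons r rows ih =>
      intro j0 c f hok
      have hr := hok r (List.mem_cons_self ..)
      obtain ⟨t1, t2, t3⟩ := tallyRow_spec j0 r c f hr.1 hr.2
      set cf' := tallyRow j0 r (c, f) with hcf'
      have hstep : ((r :: rows).zipIdx j0).foldl (fun cf cj => tallyRow cj.2 cj.1 cf) (c, f)
          = ((rows.zipIdx (j0 + 1)).foldl (fun cf cj => tallyRow cj.2 cj.1 cf) (cf'.1, cf'.2)) := by
        rw [List.zipIdx_cons, List.foldl_cons]
      obtain ⟨ih1, ih2, ih3, ih4⟩ := ih (j0 + 1) cf'.1 cf'.2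
        (fun r' hr' => ⟨(hok r' (List.mem_cons_of_mem _ hr')).1,
          fun k hk => by
            have := (hok r' (List.mem_cons_of_mem _ hr')).2 k hk
            omega⟩)
      obtain ⟨tc, tf⟩ := t3 i
      refine ⟨by rw [hstep, ih1, t1], by rw [hstep, ih2, t2], ?_, ?_⟩
      · rw [hstep, ih3, tc, List.countP_cons]
        by_cases him : i ∈ r
        · rw [if_pos him, if_pos (by simpa using him)]
          push_cast
          ring
        · rw [if_neg him, if_neg (by simpa using him)]
          push_cast
          ring
      · rw [hstep, ih4, tf]
        by_cases him : i ∈ r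
        · by_cases hneg : f.getD i 0 < 0
          · have e1 : (if i ∈ r ∧ f.getD i 0 < 0 then (j0 : Int) else f.getD i 0) = (j0 : Int) :=
              if_pos ⟨him, hneg⟩
            rw [e1, if_neg (show ¬((j0 : Int) < 0) by omega), if_pos hneg,
              List.findIdx?_cons, if_pos (show decide (i ∈ r) = true by simpa using him)]
            norm_num
          · have e1 : (if i ∈ r ∧ f.getD i 0 < 0 then (j0 : Int) else f.getD i 0) = f.getD i 0 :=
              if_neg (fun hh => hneg hh.2)
            rw [e1, if_neg hneg, if_neg hneg]
        · have e1 : (if i ∈ r ∧ f.getD i 0 < 0 then (j0 : Int) else f.getD i 0) = f.getD i 0 :=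
            if_neg (fun hh => him hh.1)
          rw [e1]
          by_cases hneg : f.getD i 0 < 0
          · rw [if_pos hneg, if_pos hneg, List.findIdx?_cons,
              if_neg (show ¬(decide (i ∈ r) = true) by simpa using him)]
            cases hfi : rows.findIdx? (fun r => decide (i ∈ r)) with
            | none => simp
            | some d =>
                simp only [Option.map_some]
                push_cast
                ring
          · rw [if_neg hneg, if_neg hneg]

-- ---- findIdx? / filter links ----
theorem findIdx?_congr (p q : List Int → Bool) :
    ∀ (l : List (List Int)), (∀ y ∈ l, p y = q y) → l.findIdx? p = l.findIdx? q := by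
  intro l
  induction l with
  | nil => intro _; rfl
  | cons a l ih =>
      intro h
      rw [List.findIdx?_cons, List.findIdx?_cons, h a (List.mem_cons_self ..),
        ih (fun y hy => h y (List.mem_cons_of_mem _ hy))]

theorem findIdx?_some_getD (q : List Int → Bool) :
    ∀ (l : List (List Int)) (d : Nat), l.findIdx? q = some d →
      d < l.length ∧ l.getD d [] = (l.filter q).headI := by
  intro l
  induction l with
  | nil => intro d h; rw [List.findIdx?_nil] at h; cases h
  | cons a l ih =>
      intro d h
      rw [List.findIdx?_cons] at h
      by_cases ha : q a = true
      · rw [if_pos ha] at h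
        cases h
        simp [List.filter_cons_of_pos ha]
      · rw [if_neg ha] at h
        cases hfi : l.findIdx? q with
        | none => rw [hfi] at h; simp at h
        | some d' =>
            rw [hfi] at h
            simp only [Option.map_some] at h
            cases h
            obtain ⟨hlt, heq⟩ := ih d' hfi
            refine ⟨by simpa using Nat.succ_lt_succ hlt, ?_⟩
            rw [List.filter_cons_of_neg ha, List.getD_cons_succ, heq]

-- ---- selectGo spec ----
theorem selectGo_spec :
    ∀ (r : List Nat) (covd : List Bool), (∀ k ∈ r, k < covd.length) →
      (selectGo covd r).length = covd.length ∧
      ∀ k, (selectGo covd r).getD k false = (covd.getD k false || decide (k ∈ r)) := by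
  intro r
  induction r with
  | nil => intro covd _; exact ⟨rfl, fun k => by simp [selectGo]⟩
  | cons k0 r ih =>
      intro covd hlt
      have hk0 : k0 < covd.length := hlt k0 (List.mem_cons_self ..)
      have hstep : selectGo covd (k0 :: r) = selectGo (covd.set k0 true) r := by
        simp [selectGo]
      obtain ⟨ih1, ih2⟩ := ih (covd.set k0 true)
        (fun k hk => by have := hlt k (List.mem_cons_of_mem _ hk); simpa using this)
      refine ⟨by rw [hstep, ih1, List.length_set], fun k => ?_⟩
      rw [hstep, ih2 k]
      by_cases hkk : k = k0
      · subst hkk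
        have h1 : (covd.set k true).getD k false = true := by
          rw [List.getD_eq_getElem?_getD, List.getElem?_set_self hk0, Option.getD_some]
        rw [h1]
        simp [List.mem_cons]
      · have h1 : (covd.set k0 true).getD k false = covd.getD k false := by
          rw [List.getD_eq_getElem?_getD, List.getElem?_set_ne (Ne.symm hkk),
            ← List.getD_eq_getElem?_getD]
        rw [h1]
        simp [List.mem_cons, hkk]

-- ---- B's tally facts, packaged ----
def chartB (l1 : List (List Int)) (x : List Int) : List (List Int) :=
  l1.filter (fun y => compareTermB x y)

theorem decide_mem_rowOfB (terms : List (List Int)) (y : List Int) (i : Nat)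
    (hi : i < terms.length) :
    decide (i ∈ rowOfB terms y) = compareTermB (terms.getD i []) y := by
  cases hq : compareTermB (terms.getD i []) y with
  | true => simp [(mem_rowOfB terms y i).mpr ⟨hi, hq⟩]
  | false =>
      simp only [decide_eq_false_iff_not]
      intro hm
      have h2 := ((mem_rowOfB terms y i).mp hm).2
      rw [hq] at h2
      cases h2

def TallyOK (l1 terms : List (List Int)) (count first : List Int) : Prop :=
  ∀ i < terms.length,
    count.getD i 0 = ((chartB l1 (terms.getD i [])).length : Int) ∧
    (chartB l1 (terms.getD i []) = [] → first.getD i 0 = -1) ∧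
    (chartB l1 (terms.getD i []) ≠ [] →
       0 ≤ first.getD i 0 ∧
       PySem.List.pyGetD l1 (first.getD i 0) [] = (chartB l1 (terms.getD i [])).headI ∧
       PySem.List.pyGetD (l1.map (rowOfB terms)) (first.getD i 0) []
         = rowOfB terms ((chartB l1 (terms.getD i [])).headI))

theorem tallyOK (l1 terms : List (List Int)) :
    TallyOK l1 terms
      (((l1.map (rowOfB terms)).zipIdx.foldl (fun cf cj => tallyRow cj.2 cj.1 cf)
        (List.replicate terms.length 0, List.replicate terms.length (-1 : Int))).1)
      (((l1.map (rowOfB terms)).zipIdx.foldl (fun cf cj => tallyRow cj.2 cj.1 cf)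
        (List.replicate terms.length 0, List.replicate terms.length (-1 : Int))).2) := by
  intro i hi
  set n := terms.length
  have hok : ∀ r ∈ l1.map (rowOfB terms), r.Nodup ∧
      ∀ k ∈ r, k < (List.replicate n (0 : Int)).length ∧ k < (List.replicate n (-1 : Int)).length := by
    intro r hr
    rcases List.mem_map.mp hr with ⟨y, _, rfl⟩
    refine ⟨nodup_rowOfB terms y, fun k hk => ?_⟩
    have hklt := (mem_rowOfB terms y k).mp hk
    simp only [List.length_replicate]
    exact ⟨hklt.1, hklt.1⟩
  obtain ⟨_, _, hc, hf⟩ := tally_spec i (l1.map (rowOfB terms)) 0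
    (List.replicate n 0) (List.replicate n (-1 : Int)) hok
  have hc0 : (List.replicate n (0 : Int)).getD i 0 = 0 := by
    rw [List.getD_replicate _ hi]
  have hf0 : (List.replicate n (-1 : Int)).getD i 0 = -1 := by
    rw [List.getD_replicate _ hi]
  -- countP over the mapped rows is the chart-column length
  have hcount : (l1.map (rowOfB terms)).countP (fun r => decide (i ∈ r))
      = (chartB l1 (terms.getD i [])).length := by
    rw [List.countP_map]
    have hcp : l1.countP ((fun r => decide (i ∈ r)) ∘ rowOfB terms)
        = l1.countP (fun y => compareTermB (terms.getD i []) y) :=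
      List.countP_congr (fun y _ => by
        rw [Function.comp_apply, decide_mem_rowOfB terms y i hi])
    rw [hcp, List.countP_eq_length_filter]
    rfl
  have hfind : (l1.map (rowOfB terms)).findIdx? (fun r => decide (i ∈ r))
      = l1.findIdx? (fun y => compareTermB (terms.getD i []) y) := by
    rw [List.findIdx?_map]
    exact findIdx?_congr _ _ l1 (fun y _ => by
      rw [Function.comp_apply, decide_mem_rowOfB terms y i hi])
  refine ⟨by rw [hc, hc0, hcount]; ring, ?_, ?_⟩
  · intro hnil
    rw [hf, hf0, if_pos (by norm_num), hfind]
    have hfn : l1.findIdx? (fun y => compareTermB (terms.getD i []) y) = none := by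
      rw [List.findIdx?_eq_none_iff]
      intro y hy
      by_contra hq
      have hmem : y ∈ chartB l1 (terms.getD i []) :=
        List.mem_filter.mpr ⟨hy, by simpa using hq⟩
      rw [hnil] at hmem
      simp at hmem
    rw [hfn]
  · intro hne
    have : ∃ d, l1.findIdx? (fun y => compareTermB (terms.getD i []) y) = some d := by
      cases hfi : l1.findIdx? (fun y => compareTermB (terms.getD i []) y) with
      | some d => exact ⟨d, rfl⟩
      | none =>
          exfalso
          rw [List.findIdx?_eq_none_iff] at hfi
          exact hne (List.filter_eq_nil_iff.mpr (fun y hy => by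
            rw [hfi y hy]
            simp))
    obtain ⟨d, hd⟩ := this
    obtain ⟨hdlt, hdget⟩ := findIdx?_some_getD _ l1 d hd
    have hfv : (((l1.map (rowOfB terms)).zipIdx.foldl (fun cf cj => tallyRow cj.2 cj.1 cf)
        (List.replicate n 0, List.replicate n (-1 : Int))).2).getD i 0 = (d : Int) := by
      rw [hf, hf0, if_pos (by norm_num), hfind, hd]
      norm_num
    refine ⟨by rw [hfv]; positivity, ?_, ?_⟩
    · rw [hfv, PySem.List.pyGetD_natCast, hdget]
      rfl
    · rw [hfv, PySem.List.pyGetD_natCast]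
      have hmap : (l1.map (rowOfB terms)).getD d [] = rowOfB terms (l1.getD d []) := by
        rw [List.getD_eq_getElem (l1.map (rowOfB terms)) [] (by simpa using hdlt),
          List.getElem_map, List.getD_eq_getElem l1 [] hdlt]
      rw [hmap, hdget]
      rfl

-- ---- phase invariant and phase lemmas ----
def InvB (l1 terms : List (List Int)) (st : List (List Int) × List Bool) : Prop :=
  (∀ e ∈ st.1, e ∈ l1) ∧ st.2.length = terms.length ∧
  ∀ k < terms.length,
    (st.2.getD k false = true ↔ ∃ y ∈ st.1, compareTermB (terms.getD k []) y = true)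

-- selecting the head implicant of a nonempty chart column preserves the invariant
theorem selectB_spec (l1 terms : List (List Int)) (st : List (List Int) × List Bool)
    (j : Int) (x : List Int) (hInv : InvB l1 terms st)
    (hx : chartB l1 x ≠ [])
    (hj1 : PySem.List.pyGetD l1 j [] = (chartB l1 x).headI)
    (hj2 : PySem.List.pyGetD (l1.map (rowOfB terms)) j [] = rowOfB terms ((chartB l1 x).headI)) :
    (selectB l1 (l1.map (rowOfB terms)) st j).1 = st.1 ++ [(chartB l1 x).headI] ∧
    InvB l1 terms (selectB l1 (l1.map (rowOfB terms)) st j) := by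
  obtain ⟨hsub, hlen, hcov⟩ := hInv
  have hhead : (chartB l1 x).headI ∈ l1 :=
    (List.mem_filter.mp (headI_mem_of_ne_nil _ hx)).1
  have hr : ∀ k ∈ rowOfB terms ((chartB l1 x).headI), k < st.2.length := by
    intro k hk
    rw [hlen]
    exact ((mem_rowOfB ..).mp hk).1
  obtain ⟨sg1, sg2⟩ := selectGo_spec (rowOfB terms ((chartB l1 x).headI)) st.2 hr
  refine ⟨by simp [selectB, hj1], ?_, ?_, ?_⟩
  · intro e he
    simp only [selectB, hj1] at he
    rcases List.mem_append.mp he with h | h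
    · exact hsub e h
    · rw [List.mem_singleton] at h; subst h; exact hhead
  · simp only [selectB, hj2]
    rw [sg1, hlen]
  · intro k hk
    simp only [selectB, hj1, hj2]
    rw [sg2 k]
    constructor
    · intro h
      rcases Bool.or_eq_true .. |>.mp h with h | h
      · obtain ⟨y, hy, hcy⟩ := (hcov k hk).mp h
        exact ⟨y, List.mem_append_left _ hy, hcy⟩
      · have := ((mem_rowOfB ..).mp (by simpa using h)).2
        exact ⟨(chartB l1 x).headI, List.mem_append_right _ (List.mem_singleton.mpr rfl), this⟩
    · rintro ⟨y, hy, hcy⟩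
      rcases List.mem_append.mp hy with h | h
      · exact Bool.or_eq_true .. |>.mpr (Or.inl ((hcov k hk).mpr ⟨y, h, hcy⟩))
      · rw [List.mem_singleton] at h; subst h
        refine Bool.or_eq_true .. |>.mpr (Or.inr ?_)
        simpa using (mem_rowOfB ..).mpr ⟨hk, hcy⟩

theorem phaseB1_spec (l1 terms : List (List Int)) (count first : List Int)
    (hT : TallyOK l1 terms count first) :
    ∀ (m s : Nat) (st : List (List Int) × List Bool),
      s + m = terms.length → InvB l1 terms st →
      ((List.range' s m).foldl (bodyB1 l1 (l1.map (rowOfB terms)) count first) st).1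
        = ((terms.drop s).map (chartB l1)).foldl stepB1 st.1 ∧
      InvB l1 terms ((List.range' s m).foldl (bodyB1 l1 (l1.map (rowOfB terms)) count first) st) := by
  intro m
  induction m with
  | zero =>
      intro s st hs hInv
      have : terms.drop s = [] := List.drop_eq_nil_of_le (by omega)
      simp [this, hInv]
  | succ m ih =>
      intro s st hs hInv
      have hslt : s < terms.length := by omega
      have hdrop : terms.drop s = terms.getD s [] :: terms.drop (s + 1) := by
        rw [List.drop_eq_getElem_cons hslt, List.getD_eq_getElem terms [] hslt]
      obtain ⟨hcnt, hnil, hpos⟩ := hT s hslt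
      rw [List.range'_succ, List.foldl_cons, hdrop, List.map_cons, List.foldl_cons]
      set x := terms.getD s []
      by_cases hlen1 : (chartB l1 x).length = 1
      · have hne : chartB l1 x ≠ [] := by
          intro h0; rw [h0] at hlen1; simp at hlen1
        obtain ⟨hge, hj1, hj2⟩ := hpos hne
        have hcond1 : count.getD s 0 = 1 := by rw [hcnt, hlen1]; norm_num
        by_cases hcontains : st.1.contains (chartB l1 x).headI
        · have : bodyB1 l1 (l1.map (rowOfB terms)) count first st s = st := by
            rw [bodyB1, if_neg]
            intro hc
            exact hc.2 (by rwa [hj1])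
          rw [this]
          have hstep : stepB1 st.1 (chartB l1 x) = st.1 := by
            rw [stepB1, if_neg]
            intro hc
            exact hc.2 hcontains
          rw [hstep]
          exact ih (s + 1) st (by omega) hInv
        · have hbody : bodyB1 l1 (l1.map (rowOfB terms)) count first st s
              = selectB l1 (l1.map (rowOfB terms)) st (first.getD s 0) := by
            rw [bodyB1, if_pos ⟨hcond1, by rwa [hj1]⟩]
          obtain ⟨hsel1, hselInv⟩ := selectB_spec l1 terms st (first.getD s 0) x hInv hne hj1 hj2
          have hstep : stepB1 st.1 (chartB l1 x) = st.1 ++ [(chartB l1 x).headI] := by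
            rw [stepB1, if_pos ⟨hlen1, hcontains⟩]
          obtain ⟨ih1, ih2⟩ := ih (s + 1) _ (by omega) hselInv
          constructor
          · rw [hbody, hstep, ih1, hsel1]
          · rw [hbody]
            exact ih2
      · have hbody : bodyB1 l1 (l1.map (rowOfB terms)) count first st s = st := by
          rw [bodyB1, if_neg]
          intro hc
          apply hlen1
          have := hc.1
          rw [hcnt] at this
          exact_mod_cast this
        have hstep : stepB1 st.1 (chartB l1 x) = st.1 := by
          rw [stepB1, if_neg]
          intro hc
          exact hlen1 hc.1
        rw [hbody, hstep]
        exact ih (s + 1) st (by omega) hInv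

theorem phaseB2_spec (l1 terms : List (List Int)) (first : List Int) (count : List Int)
    (hT : TallyOK l1 terms count first) :
    ∀ (m s : Nat) (st : List (List Int) × List Bool),
      s + m = terms.length → InvB l1 terms st →
      ((List.range' s m).foldl (bodyB2 l1 (l1.map (rowOfB terms)) first) st).1
        = ((terms.drop s).map (chartB l1)).foldl stepB2 st.1 := by
  intro m
  induction m with
  | zero =>
      intro s st hs _
      have : terms.drop s = [] := List.drop_eq_nil_of_le (by omega)
      simp [this]
  | succ m ih =>
      intro s st hs hInv
      have hslt : s < terms.length := by omega
      have hdrop : terms.drop s = terms.getD s [] :: terms.drop (s + 1) := by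
        rw [List.drop_eq_getElem_cons hslt, List.getD_eq_getElem terms [] hslt]
      obtain ⟨hcnt, hnil, hpos⟩ := hT s hslt
      rw [List.range'_succ, List.foldl_cons, hdrop, List.map_cons, List.foldl_cons]
      set x := terms.getD s []
      obtain ⟨hsub, hlen, hcov⟩ := hInv
      -- the coverage test agrees with the chart-column test
      have hcovx : (st.2.getD s false = true)
          ↔ ((chartB l1 x).any fun y => st.1.contains y) = true := by
        rw [hcov s hslt]
        have := any_cond_eq (fun y => compareTermB x y) l1 st.1 hsub
        constructor
        · rintro ⟨y, hy, hcy⟩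
          have h1 : st.1.any (fun y => compareTermB x y) = true :=
            List.any_eq_true.mpr ⟨y, hy, hcy⟩
          rw [this] at h1
          exact h1
        · intro h
          have h' : ((l1.filter fun y => compareTermB x y).any fun y => st.1.contains y) = true := h
          rw [← this] at h'
          obtain ⟨y, hy, hcy⟩ := List.any_eq_true.mp h'
          exact ⟨y, hy, hcy⟩
      by_cases hne : chartB l1 x = []
      · have hf : first.getD s 0 = -1 := hnil hne
        have hbody : bodyB2 l1 (l1.map (rowOfB terms)) first st s = st := by
          rw [bodyB2, if_neg]
          intro hc
          rw [hf] at hc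
          exact absurd hc.2 (by norm_num)
        have hstep : stepB2 st.1 (chartB l1 x) = st.1 := by
          rw [stepB2, if_neg]; intro hc; exact hc.1 hne
        rw [hbody, hstep]
        exact ih (s + 1) st (by omega) ⟨hsub, hlen, hcov⟩
      · obtain ⟨hge, hj1, hj2⟩ := hpos hne
        by_cases hcv : st.2.getD s false = true
        · have hbody : bodyB2 l1 (l1.map (rowOfB terms)) first st s = st := by
            rw [bodyB2, if_neg]
            intro hc
            rw [hcv] at hc
            exact absurd hc.1 (by simp)
          have hstep : stepB2 st.1 (chartB l1 x) = st.1 := by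
            rw [stepB2, if_neg]
            intro hc
            exact hc.2 (hcovx.mp hcv)
          rw [hbody, hstep]
          exact ih (s + 1) st (by omega) ⟨hsub, hlen, hcov⟩
        · have hcvf : st.2.getD s false = false := by
            cases h : st.2.getD s false
            · rfl
            · exact absurd h hcv
          have hbody : bodyB2 l1 (l1.map (rowOfB terms)) first st s
              = selectB l1 (l1.map (rowOfB terms)) st (first.getD s 0) := by
            rw [bodyB2, if_pos ⟨hcvf, hge⟩]
          have hanyf : ¬ ((chartB l1 x).any fun y => st.1.contains y) = true := by
            intro h
            exact hcv (hcovx.mpr h)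
          have hstep : stepB2 st.1 (chartB l1 x) = st.1 ++ [(chartB l1 x).headI] := by
            rw [stepB2, if_pos ⟨hne, hanyf⟩]
          obtain ⟨hsel1, hselInv⟩ :=
            selectB_spec l1 terms st (first.getD s 0) x ⟨hsub, hlen, hcov⟩ hne hj1 hj2
          have ihr := ih (s + 1) _ (by omega) hselInv
          rw [hbody, hstep, ihr, hsel1]

-- ---- B equals the chart fold ----
theorem alt_eq_chartfold (l1 terms : List (List Int)) :
    rem_redundancy_py_alt l1 terms
      = (terms.map (chartB l1)).foldl stepB2 ((terms.map (chartB l1)).foldl stepB1 []) := by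
  unfold rem_redundancy_py_alt
  set cover := l1.map (rowOfB terms) with hcover
  set cf := (cover.zipIdx).foldl (fun cf cj => tallyRow cj.2 cj.1 cf)
    (List.replicate terms.length 0, List.replicate terms.length (-1 : Int)) with hcf
  have hT : TallyOK l1 terms cf.1 cf.2 := tallyOK l1 terms
  have hInv0 : InvB l1 terms ([], List.replicate terms.length false) := by
    refine ⟨by simp, by simp, fun k hk => ?_⟩
    simp
  rw [List.range_eq_range']
  obtain ⟨h1, hInv1⟩ := phaseB1_spec l1 terms cf.1 cf.2 hT terms.length 0
    ([], List.replicate terms.length false) (by omega) hInv0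
  have h2 := phaseB2_spec l1 terms cf.2 cf.1 hT terms.length 0 _ (by omega) hInv1
  rw [h2, h1]
  simp

-- ===== VERDICT (by name: the statement is the Claim_ definition above) =====
theorem rem_redundancy_py_spec : Claim_equal_rem_redundancy_py := by
  intro l1 terms _ hPre
  show rem_redundancy_py l1 terms = rem_redundancy_py_alt l1 terms
  have hcharts : terms.map (fun x => l1.filter (fun y => compareTerm x y))
      = terms.map (chartB l1) := by
    apply List.map_congr_left
    intro x hx
    apply List.filter_congr
    intro y hy
    exact compareTerm_eq_B x y (hPre x hx y hy)
  have hA : rem_redundancy_py l1 terms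
      = (terms.map (fun x => l1.filter (fun y => compareTerm x y))).foldl stepB2
          ((terms.map (fun x => l1.filter (fun y => compareTerm x y))).foldl stepB1 []) := by
    unfold rem_redundancy_py
    rw [show (terms.foldl (fun essential x =>
        let temporary := l1.foldl (fun temporary y =>
          if compareTerm x y then temporary ++ [y] else temporary) []
        match temporary with
        | [t] => if essential.contains t then essential else essential ++ [t]
        | _ => essential) []) = terms.foldl (stepA1 l1) [] from rfl]
    rw [show (fun (essential : List (List Int)) (x : List Int) =>
        if essential.any (fun y => compareTerm x y) then essential
        else
          match l1.find? (fun z => compareTerm x z) with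
          | some z => essential ++ [z]
          | none => essential) = stepA2 l1 from rfl]
    rw [phase1_eq]
    rw [phase2_eq l1 terms _ (phase1_mem l1 _ [] (by simp)
      (fun m hm y hy => by
        rcases List.mem_map.mp hm with ⟨x, _, rfl⟩
        exact (List.mem_filter.mp hy).1))]
  rw [hA, hcharts, alt_eq_chartfold]
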